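-- pv_equiv track=rewrite | github.com/jk-jung/problem-solving | codewars/5kyu/5_Subarrays with an odd number of odd numbers.py | solve
-- ===== SOURCE A (Python) =====
-- def solve(arr):
--     d = [1, 0]
--     r, st = 0, 0
--     for x in arr:
--         if x % 2: st ^= 1
--         d[st] += 1
--         r += d[st ^ 1]
--     return r
-- ===== SOURCE B (Python) =====
-- def solve(arr):
--     c0, c1 = 1, 0
--     st = 0
--     for x in arr:
--         if x % 2:
--             st ^= 1
--         if st:
--             c1 += 1
--         else:
--             c0 += 1
--     return c0 * c1
-- ===== Notes on version B (the rewrite author's own statement) =====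
-- stated objective: simpler
-- what changed: Replaces the incremental cross-sum (r += count of opposite-parity prefixes at each step) by counting prefix parities once and returning the product c0*c1 at the end.
import Mathlib
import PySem

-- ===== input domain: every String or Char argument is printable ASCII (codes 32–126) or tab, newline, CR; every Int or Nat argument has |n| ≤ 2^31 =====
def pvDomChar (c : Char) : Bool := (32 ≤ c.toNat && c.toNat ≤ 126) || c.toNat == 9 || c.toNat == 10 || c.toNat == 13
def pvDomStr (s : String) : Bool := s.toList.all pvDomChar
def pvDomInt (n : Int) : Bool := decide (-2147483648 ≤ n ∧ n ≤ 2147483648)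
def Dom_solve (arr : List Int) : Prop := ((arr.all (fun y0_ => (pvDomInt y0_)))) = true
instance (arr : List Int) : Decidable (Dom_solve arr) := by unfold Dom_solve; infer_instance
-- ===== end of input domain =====

-- B replaces A's incremental cross-sum by counting prefix parities and returning the product c0*c1 (simpler decomposition, same cost).


-- ===== PORT A =====
-- state: ((d0, d1), r, st); the Python two-element list d is the pair (d0, d1),
-- d[st] / d[st ^ 1] become the if-on-st selections, st ^= 1 on st ∈ {0,1} is st := 1 - st
def solveStepA (s : (Int × Int) × Int × Int) (x : Int) : (Int × Int) × Int × Int :=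
  let st := if PySem.Int.mod x 2 ≠ 0 then 1 - s.2.2 else s.2.2
  let d := if st = 0 then (s.1.1 + 1, s.1.2) else (s.1.1, s.1.2 + 1)
  let r := s.2.1 + (if st = 0 then d.2 else d.1)
  (d, r, st)

def solve (arr : List Int) : Int :=
  (arr.foldl solveStepA ((1, 0), 0, 0)).2.1

-- ===== PORT B =====
-- state: (c0, c1, st)
def solveStepB (s : Int × Int × Int) (x : Int) : Int × Int × Int :=
  let st := if PySem.Int.mod x 2 ≠ 0 then 1 - s.2.2 else s.2.2
  if st ≠ 0 then (s.1, s.2.1 + 1, st) else (s.1 + 1, s.2.1, st)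

def solve_alt (arr : List Int) : Int :=
  let s := arr.foldl solveStepB (1, 0, 0)
  s.1 * s.2.1

-- ===== PRECONDITION & SPEC =====
def Spec_solve (arr : List Int) (out : Int) : Prop := out = solve_alt arr
instance (arr : List Int) (out : Int) : Decidable (Spec_solve arr out) := by unfold Spec_solve; infer_instance

-- ===== CLAIM (what is proved, stated in full; the proofs are below) =====
def Claim_equal_solve : Prop := ∀ (arr : List Int), Dom_solve arr → Spec_solve arr (solve arr)

-- ===== LEMMAS AND PROOFS =====

-- Invariant: running r equals the product of the two parity counters throughout.
theorem solve_fold_inv (arr : List Int) : ∀ (c0 c1 st : Int),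
    arr.foldl solveStepA ((c0, c1), c0 * c1, st) =
      (let s := arr.foldl solveStepB (c0, c1, st); ((s.1, s.2.1), s.1 * s.2.1, s.2.2)) := by
  induction arr with
  | nil => intro c0 c1 st; rfl
  | cons x rest ih =>
    intro c0 c1 st
    simp only [List.foldl_cons]
    set st' : Int := if PySem.Int.mod x 2 ≠ 0 then 1 - st else st with hst'
    by_cases h0 : st' = 0
    · have hA : solveStepA ((c0, c1), c0 * c1, st) x = ((c0 + 1, c1), (c0 + 1) * c1, st') := by
        simp only [solveStepA, ← hst', h0, if_pos]; simp; ring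
      have hB : solveStepB (c0, c1, st) x = (c0 + 1, c1, st') := by
        simp only [solveStepB, ← hst', h0]; simp
      rw [hA, hB, ih]
    · have hA : solveStepA ((c0, c1), c0 * c1, st) x = ((c0, c1 + 1), c0 * (c1 + 1), st') := by
        simp only [solveStepA, ← hst', h0]; simp; ring
      have hB : solveStepB (c0, c1, st) x = (c0, c1 + 1, st') := by
        simp only [solveStepB, ← hst']; simp [h0]
      rw [hA, hB, ih]

-- ===== VERDICT (by name: the statement is the Claim_ definition above) =====
theorem solve_spec : Claim_equal_solve := by
  intro arr _
  unfold Spec_solve solve solve_alt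
  have h := solve_fold_inv arr 1 0 0
  simp only [mul_zero] at h
  rw [h]
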